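-- pv_equiv track=rewrite | github.com/reisenx/2110101-COM-PROG | GE-Grader-Examination/G6602-Exam-2566-S2/Grader-03/2566_2_Q3_02/2566_2_Q3_02.py | count_friends
-- ===== SOURCE A (Python) =====
-- def count_friends(
--     friends: list[tuple[str, str]], names: list[str]
-- ) -> list[tuple[str, int]]:
--     # Create a dictionary to store set of friends of each person.
--     all_friends = {}
--     for a, b in friends:
--         # Initialize the sets for each person if they do not exist.
--         if a not in all_friends:
--             all_friends[a] = set()
--         if b not in all_friends:
--             all_friends[b] = set()
--         # Add each person to the other's set of friends.
--         all_friends[a].add(b)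
--         all_friends[b].add(a)
--
--     # Sort the names and count the number of friends for each.
--     result = []
--     for name in sorted(names):
--         # If the name is not in the dictionary, they have no friends.
--         if name not in all_friends:
--             result.append((name, 0))
--         # Otherwise, append the name and the count of friends.
--         else:
--             result.append((name, len(all_friends[name])))
--     # Return the sorted list of tuples with names and their friend counts.
--     return result
-- ===== SOURCE B (Python) =====
-- def count_friends(
--     friends: list[tuple[str, str]], names: list[str]
-- ) -> list[tuple[str, int]]:
--     # Brute force, query-driven: no dictionary and no set anywhere.
--     # For each queried name, collect its partner occurrences in one scan,
--     # then count the distinct ones as the positions that are first occurrences.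
--     def degree(name):
--         partners = []
--         for a, b in friends:
--             if a == name:
--                 partners.append(b)
--             elif b == name:
--                 partners.append(a)
--         return sum(1 for j, p in enumerate(partners) if partners.index(p) == j)
--
--     return [(name, degree(name)) for name in sorted(names)]
-- ===== Notes on version B (the rewrite author's own statement) =====
-- stated objective: alternative
-- what changed: Drops A's global dictionary of per-person sets entirely: B is query-driven brute force that, for each sorted queried name, scans the friend pairs to collect that name's partner occurrences and counts the distinct ones as first-occurrence positions (partners.index(p) == j), using no dict and no set.
import Mathlib
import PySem

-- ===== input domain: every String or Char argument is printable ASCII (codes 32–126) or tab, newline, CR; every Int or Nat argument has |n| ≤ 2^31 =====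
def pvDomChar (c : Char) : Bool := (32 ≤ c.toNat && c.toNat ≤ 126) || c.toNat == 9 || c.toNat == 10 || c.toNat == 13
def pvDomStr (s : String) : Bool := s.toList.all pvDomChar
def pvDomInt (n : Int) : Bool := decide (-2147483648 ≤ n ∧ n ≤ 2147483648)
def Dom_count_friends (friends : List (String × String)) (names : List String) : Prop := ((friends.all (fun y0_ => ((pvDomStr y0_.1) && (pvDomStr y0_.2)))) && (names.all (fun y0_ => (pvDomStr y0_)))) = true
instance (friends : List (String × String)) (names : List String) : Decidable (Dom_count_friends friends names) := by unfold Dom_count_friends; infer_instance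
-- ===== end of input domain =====

-- B drops A's dictionary of per-person sets for query-driven brute force: per sorted name,
-- one scan collects partner occurrences and first-occurrence positions are counted
-- (objective: alternative decomposition, no dict/set; not faster).


-- ===== PORT A =====
-- one iteration of A's 'for a, b in friends' loop over the adjacency dictionary
def stepA (d : PySem.Dict String (PySem.Set String)) (p : String × String) :
    PySem.Dict String (PySem.Set String) :=
  let d1 := if d.contains p.1 then d else d.insert p.1 PySem.Set.empty
  let d2 := if d1.contains p.2 then d1 else d1.insert p.2 PySem.Set.empty
  let d3 := d2.modify p.1 PySem.Set.empty (fun s => PySem.Set.add s p.2)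
  d3.modify p.2 PySem.Set.empty (fun s => PySem.Set.add s p.1)

def count_friends (friends : List (String × String)) (names : List String) : List (String × Int) :=
  let all_friends := friends.foldl stepA PySem.Dict.empty
  (PySem.List.sorted names (fun x => x) false).foldl
    (fun result name =>
      if all_friends.contains name = false then
        result ++ [(name, (0 : Int))]
      else
        result ++ [(name, PySem.Set.len (all_friends.getD name PySem.Set.empty))]) []

-- ===== PORT B =====
-- B's inner scan: 'if a == name: partners.append(b) elif b == name: partners.append(a)'
def partnersOf (friends : List (String × String)) (name : String) : List String :=
  friends.foldl
    (fun acc p =>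
      if p.1 = name then acc ++ [p.2]
      else if p.2 = name then acc ++ [p.1]
      else acc) []

-- B's 'degree': sum(1 for j, p in enumerate(partners) if partners.index(p) == j)
def degreeOf (friends : List (String × String)) (name : String) : Int :=
  let partners := partnersOf friends name
  (PySem.List.enumerate partners 0).foldl
    (fun s jp =>
      if (PySem.List.index? partners jp.2).map Int.ofNat = some jp.1 then s + 1 else s) 0

def count_friends_alt (friends : List (String × String)) (names : List String) : List (String × Int) :=
  (PySem.List.sorted names (fun x => x) false).map (fun name => (name, degreeOf friends name))

-- ===== PRECONDITION & SPEC =====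
def Spec_count_friends (friends : List (String × String)) (names : List String) (out : List (String × Int)) : Prop := out = count_friends_alt friends names
instance (friends : List (String × String)) (names : List String) (out : List (String × Int)) : Decidable (Spec_count_friends friends names out) := by unfold Spec_count_friends; infer_instance

-- ===== CLAIM (what is proved, stated in full; the proofs are below) =====
def Claim_equal_count_friends : Prop := ∀ (friends : List (String × String)) (names : List String), Dom_count_friends friends names → Spec_count_friends friends names (count_friends friends names)

-- ===== LEMMAS AND PROOFS =====

-- the conditional 'initialize if missing' insert does not change any getD-with-[] lookup
theorem getD_ensure (d : PySem.Dict String (PySem.Set String)) (k x : String) :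
    ((if d.contains k then d else d.insert k PySem.Set.empty).getD x PySem.Set.empty)
      = d.getD x PySem.Set.empty := by
  split
  · rfl
  · rename_i h
    rw [PySem.Dict.getD_insert]
    split
    · rename_i hx
      subst hx
      rw [PySem.Dict.getD_of_not_contains d PySem.Set.empty (by simpa using h)]
    · rfl

theorem getD_stepA (d : PySem.Dict String (PySem.Set String)) (p : String × String) (x : String) :
    (stepA d p).getD x PySem.Set.empty =
      (if x = p.2 then
        PySem.Set.add
          (if p.2 = p.1 then PySem.Set.add (d.getD p.1 PySem.Set.empty) p.2
           else d.getD p.2 PySem.Set.empty) p.1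
       else if x = p.1 then PySem.Set.add (d.getD p.1 PySem.Set.empty) p.2
       else d.getD x PySem.Set.empty) := by
  unfold stepA
  simp only [PySem.Dict.getD_modify, getD_ensure]

theorem mem_getD_stepA (d : PySem.Dict String (PySem.Set String)) (p : String × String)
    (x y : String) :
    y ∈ (stepA d p).getD x PySem.Set.empty ↔
      (y ∈ d.getD x PySem.Set.empty ∨ (x = p.1 ∧ y = p.2) ∨ (x = p.2 ∧ y = p.1)) := by
  rw [getD_stepA]
  by_cases h2 : x = p.2 <;> by_cases h1 : x = p.1 <;> by_cases h12 : p.2 = p.1 <;>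
    simp_all [PySem.Set.mem_add]

theorem nodup_getD_stepA (d : PySem.Dict String (PySem.Set String)) (p : String × String)
    (x : String) (h : ∀ z, (d.getD z PySem.Set.empty).Nodup) :
    ((stepA d p).getD x PySem.Set.empty).Nodup := by
  rw [getD_stepA]
  split
  · exact PySem.Set.nodup_add _ _ (by split <;> [exact PySem.Set.nodup_add _ _ (h _); exact h _])
  · split
    · exact PySem.Set.nodup_add _ _ (h _)
    · exact h _

-- membership in A's adjacency dictionary after the whole fold: exactly the undirected edges
theorem mem_foldA (fr : List (String × String)) :
    ∀ (d : PySem.Dict String (PySem.Set String)) (x y : String),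
      y ∈ (fr.foldl stepA d).getD x PySem.Set.empty ↔
        (y ∈ d.getD x PySem.Set.empty ∨
          ∃ p ∈ fr, (x = p.1 ∧ y = p.2) ∨ (x = p.2 ∧ y = p.1)) := by
  induction fr with
  | nil => simp
  | cons p t ih =>
    intro d x y
    simp only [List.foldl_cons, ih, mem_getD_stepA, List.mem_cons]
    constructor
    · rintro ((h | h) | ⟨q, hq, h⟩)
      · exact Or.inl h
      · exact Or.inr ⟨p, Or.inl rfl, h⟩
      · exact Or.inr ⟨q, Or.inr hq, h⟩
    · rintro (h | ⟨q, (rfl | hq), h⟩)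
      · exact Or.inl (Or.inl h)
      · exact Or.inl (Or.inr h)
      · exact Or.inr ⟨q, hq, h⟩

theorem nodup_foldA (fr : List (String × String)) :
    ∀ (d : PySem.Dict String (PySem.Set String)),
      (∀ z, (d.getD z PySem.Set.empty).Nodup) →
      ∀ x, ((fr.foldl stepA d).getD x PySem.Set.empty).Nodup := by
  induction fr with
  | nil => intro d h; exact h
  | cons p t ih =>
    intro d h x
    exact ih (stepA d p) (fun z => nodup_getD_stepA d p z h) x

-- membership in B's partner list: the same undirected edges (the elif drops only duplicates)
theorem mem_partners_aux (fr : List (String × String)) (name : String) :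
    ∀ (acc : List String) (y : String),
      y ∈ fr.foldl
        (fun acc p =>
          if p.1 = name then acc ++ [p.2]
          else if p.2 = name then acc ++ [p.1]
          else acc) acc ↔
      (y ∈ acc ∨ ∃ p ∈ fr, (p.1 = name ∧ y = p.2) ∨ (p.2 = name ∧ ¬ p.1 = name ∧ y = p.1)) := by
  induction fr with
  | nil => simp
  | cons p t ih =>
    intro acc y
    simp only [List.foldl_cons, List.mem_cons]
    by_cases h1 : p.1 = name
    · simp only [h1, if_true, ih, List.mem_append, List.mem_singleton]
      constructor
      · rintro ((h | h) | ⟨q, hq, h⟩)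
        · exact Or.inl h
        · exact Or.inr ⟨p, Or.inl rfl, Or.inl ⟨h1, h⟩⟩
        · exact Or.inr ⟨q, Or.inr hq, h⟩
      · rintro (h | ⟨q, (rfl | hq), h⟩)
        · exact Or.inl (Or.inl h)
        · rcases h with ⟨_, h⟩ | ⟨_, hn, _⟩
          · exact Or.inl (Or.inr h)
          · exact absurd h1 hn
        · exact Or.inr ⟨q, hq, h⟩
    · by_cases h2 : p.2 = name
      · simp only [h1, h2, if_false, if_true, ih, List.mem_append, List.mem_singleton]
        constructor
        · rintro ((h | h) | ⟨q, hq, h⟩)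
          · exact Or.inl h
          · exact Or.inr ⟨p, Or.inl rfl, Or.inr ⟨h2, h1, h⟩⟩
          · exact Or.inr ⟨q, Or.inr hq, h⟩
        · rintro (h | ⟨q, (rfl | hq), h⟩)
          · exact Or.inl (Or.inl h)
          · rcases h with ⟨hq1, _⟩ | ⟨_, _, h⟩
            · exact absurd hq1 h1
            · exact Or.inl (Or.inr h)
          · exact Or.inr ⟨q, hq, h⟩
      · simp only [h1, h2, if_false, ih]
        constructor
        · rintro (h | ⟨q, hq, h⟩)
          · exact Or.inl h
          · exact Or.inr ⟨q, Or.inr hq, h⟩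
        · rintro (h | ⟨q, (rfl | hq), h⟩)
          · exact Or.inl h
          · rcases h with ⟨hq1, _⟩ | ⟨hq2, _, _⟩
            · exact absurd hq1 h1
            · exact absurd hq2 h2
          · exact Or.inr ⟨q, hq, h⟩

theorem mem_partners (fr : List (String × String)) (name y : String) :
    y ∈ partnersOf fr name ↔ ∃ p ∈ fr, (name = p.1 ∧ y = p.2) ∨ (name = p.2 ∧ y = p.1) := by
  unfold partnersOf
  rw [mem_partners_aux]
  simp only [List.not_mem_nil, false_or]
  constructor
  · rintro ⟨q, hq, ⟨h1, h⟩ | ⟨h2, _, h⟩⟩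
    · exact ⟨q, hq, Or.inl ⟨h1.symm, h⟩⟩
    · exact ⟨q, hq, Or.inr ⟨h2.symm, h⟩⟩
  · rintro ⟨q, hq, ⟨h1, h⟩ | ⟨h2, h⟩⟩
    · exact ⟨q, hq, Or.inl ⟨h1.symm, h⟩⟩
    · by_cases hq1 : q.1 = name
      · exact ⟨q, hq, Or.inl ⟨hq1, by rw [h, ← h2, ← hq1]⟩⟩
      · exact ⟨q, hq, Or.inr ⟨h2.symm, hq1, h⟩⟩

-- B's first-occurrence count over any list is the number of its distinct elements
theorem count_first_occurrences (P : List String) :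
    (PySem.List.enumerate P 0).foldl
      (fun s jp =>
        if (PySem.List.index? P jp.2).map Int.ofNat = some jp.1 then s + 1 else s) 0
      = ((PySem.Set.ofList P).length : Int) := by
  induction P using List.reverseRecOn with
  | nil => simp [PySem.List.enumerate_nil, PySem.Set.ofList]
  | append_singleton P x ih =>
    rw [PySem.List.enumerate_append, List.foldl_append]
    have hstep : ∀ (s : Int) (jp : Int × String), jp ∈ PySem.List.enumerate P 0 →
        (if (PySem.List.index? (P ++ [x]) jp.2).map Int.ofNat = some jp.1 then s + 1 else s)
          = (if (PySem.List.index? P jp.2).map Int.ofNat = some jp.1 then s + 1 else s) := by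
      intro s jp hjp
      obtain ⟨k, hk, rfl⟩ := (PySem.List.mem_enumerate_iff P 0 jp).1 hjp
      rw [PySem.List.index?_append_of_mem [x] (List.getElem_mem hk)]
    have hmain : (PySem.List.enumerate P 0).foldl
        (fun s jp =>
          if (PySem.List.index? (P ++ [x]) jp.2).map Int.ofNat = some jp.1 then s + 1 else s) 0
        = ((PySem.Set.ofList P).length : Int) := by
      rw [← ih]
      exact PySem.List.foldl_congr_mem _ _ _ _ (fun s jp h => hstep s jp h)
    rw [hmain]
    rw [PySem.List.enumerate_cons, PySem.List.enumerate_nil]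
    simp only [List.foldl_cons, List.foldl_nil, zero_add]
    rw [PySem.Set.ofList_append]
    by_cases hx : x ∈ P
    · have hidx : PySem.List.index? (P ++ [x]) x = PySem.List.index? P x :=
        PySem.List.index?_append_of_mem [x] hx
      obtain ⟨k, hk⟩ := Option.isSome_iff_exists.1 ((PySem.List.index?_isSome_iff P x).2 hx)
      obtain ⟨pre, suf, hPs, hlen, _⟩ := (PySem.List.index?_eq_some_iff P x k).1 hk
      have hklt : k < P.length := by
        rw [hPs, List.length_append, ← hlen]; simp
      have hne : (PySem.List.index? (P ++ [x]) x).map Int.ofNat ≠ some ((P.length : Int)) := by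
        intro h
        rw [hidx, hk] at h
        simp only [Option.map_some, Option.some.injEq, Int.ofNat_eq_natCast] at h
        omega
      rw [if_neg hne]
      have hupd : (PySem.Set.ofList P).update [x] = PySem.Set.ofList P := by
        show PySem.Set.add (PySem.Set.ofList P) x = PySem.Set.ofList P
        unfold PySem.Set.add
        rw [if_pos]
        simp only [PySem.Set.contains, List.contains_iff_mem]
        exact (PySem.Set.mem_ofList P x).2 hx
      rw [hupd]
    · have hnot : x ∉ PySem.Set.ofList P := fun h => hx ((PySem.Set.mem_ofList P x).1 h)
      have hupd : (PySem.Set.ofList P).update [x] = PySem.Set.ofList P ++ [x] := by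
        show PySem.Set.add (PySem.Set.ofList P) x = PySem.Set.ofList P ++ [x]
        unfold PySem.Set.add
        rw [if_neg]
        simp only [PySem.Set.contains, List.contains_iff_mem]
        exact hnot
      rw [PySem.List.index?_append_singleton_self P x hx, hupd]
      simp

-- degree = size of the set of distinct partners
theorem degreeOf_eq (fr : List (String × String)) (name : String) :
    degreeOf fr name = ((PySem.Set.ofList (partnersOf fr name)).length : Int) := by
  unfold degreeOf
  exact count_first_occurrences (partnersOf fr name)

-- A's set for a name and B's deduplicated partner list are permutations, hence equal length
theorem len_adj_eq (fr : List (String × String)) (name : String) :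
    ((fr.foldl stepA PySem.Dict.empty).getD name PySem.Set.empty).length
      = (PySem.Set.ofList (partnersOf fr name)).length := by
  apply List.Perm.length_eq
  rw [List.perm_ext_iff_of_nodup
    (nodup_foldA fr PySem.Dict.empty
      (by intro z; simp [PySem.Dict.getD_empty, PySem.Set.empty]) name)
    (PySem.Set.nodup_ofList _)]
  intro y
  rw [mem_foldA, PySem.Set.mem_ofList, mem_partners]
  simp [PySem.Dict.getD_empty, PySem.Set.empty]

-- the append-accumulator loop over the sorted names is a map
theorem foldl_two_branch_append (cond : String → Bool) (u v : String → String × Int) :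
    ∀ (l : List String) (acc : List (String × Int)),
      l.foldl (fun result name =>
        if cond name = false then result ++ [u name] else result ++ [v name]) acc
      = acc ++ l.map (fun name => if cond name = false then u name else v name) := by
  intro l
  induction l with
  | nil => simp
  | cons a t ih => intro acc; by_cases h : cond a = false <;> simp [h, ih]

-- ===== VERDICT (by name: the statement is the Claim_ definition above) =====
theorem count_friends_spec : Claim_equal_count_friends := by
  intro friends names _
  unfold Spec_count_friends count_friends count_friends_alt
  rw [foldl_two_branch_append]
  simp only [List.nil_append]
  apply List.map_congr_left
  intro name _
  have hval : degreeOf friends name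
      = PySem.Set.len ((friends.foldl stepA PySem.Dict.empty).getD name PySem.Set.empty) := by
    rw [degreeOf_eq, ← len_adj_eq]
    rfl
  by_cases hc : (friends.foldl stepA PySem.Dict.empty).contains name = false
  · have hg : (friends.foldl stepA PySem.Dict.empty).getD name PySem.Set.empty
        = PySem.Set.empty := PySem.Dict.getD_of_not_contains _ _ hc
    simp only [hc, if_true, hval, hg]
    simp [PySem.Set.empty, PySem.Set.len]
  · simp only [hval]
    simp [hc]
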